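-- pv_equiv track=rewrite | github.com/cheog0/algorithms | 1251.py | split_and_reverse
-- ===== SOURCE A (Python) =====
-- def split_and_reverse(word):
--     n = len(word)
--     min_word = word  # 초기값은 원래 단어로 설정 (나중에 비교용)
--
--     # 두 지점 i, j를 정하여 세 부분으로 나누기
--     for i in range(1, n - 1):  # i는 첫 번째 부분의 끝 (1부터 n-2까지)
--         for j in range(i + 1, n):  # j는 두 번째 부분의 끝 (i+1부터 n까지)
--             # 세 부분으로 나누기
--             part1 = word[:i]  # 첫 번째 부분
--             part2 = word[i:j]  # 두 번째 부분
--             part3 = word[j:]  # 세 번째 부분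
--
--             # 각 부분을 뒤집고 합치기
--             new_word = part1[::-1] + part2[::-1] + part3[::-1]
--
--             # 사전순으로 가장 작은 단어 찾기
--             if new_word < min_word:
--                 min_word = new_word
--
--     return min_word
-- ===== SOURCE B (Python) =====
-- def split_and_reverse(word):
--     # Every (i, j) candidate is rev(word[:i]) followed by a nontrivial rotation of
--     # rev(word[i:]); the fixed prefix factors out of the inner min, so we compare
--     # one best rotation per i instead of all (i, j) pairs globally.
--     n = len(word)
--     candidates = [word]
--     for i in range(1, n - 1):
--         r = word[i:][::-1]
--         m = n - i
--         best_rotation = min(r[t:] + r[:t] for t in range(1, m))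
--         candidates.append(word[:i][::-1] + best_rotation)
--     return min(candidates)
-- ===== Notes on version B (the rewrite author's own statement) =====
-- stated objective: faster
-- what changed: B rewrites each (i,j) candidate as rev(word[:i]) ++ rotation of rev(word[i:]) and factors the fixed reversed prefix out of the inner minimum, so it takes one best-rotation per i and a final min over n candidates instead of A's running min over all O(n^2) fully built three-slice candidates.
import Mathlib
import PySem

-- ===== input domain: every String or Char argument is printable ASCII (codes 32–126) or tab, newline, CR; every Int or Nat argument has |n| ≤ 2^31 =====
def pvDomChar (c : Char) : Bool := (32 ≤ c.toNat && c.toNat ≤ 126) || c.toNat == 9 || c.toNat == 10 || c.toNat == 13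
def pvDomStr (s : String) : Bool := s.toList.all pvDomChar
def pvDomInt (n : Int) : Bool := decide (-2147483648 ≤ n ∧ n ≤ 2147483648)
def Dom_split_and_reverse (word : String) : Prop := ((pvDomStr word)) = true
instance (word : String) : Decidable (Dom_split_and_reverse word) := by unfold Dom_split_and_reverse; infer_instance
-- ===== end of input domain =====

-- B factors each candidate as rev(word[:i]) ++ (a rotation of rev(word[i:])) and pulls the fixed
-- reversed prefix out of the inner minimum: one best rotation per i, then a min over n candidates,
-- instead of A's running min over every fully built (i, j) three-slice candidate.

-- ===== PORT A =====
def split_and_reverse (word : String) : String :=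
  let n : Int := PySem.Str.len word
  (PySem.List.pyRange 1 (n - 1)).foldl (fun min_word i =>
    (PySem.List.pyRange (i + 1) n).foldl (fun min_word j =>
      let part1 := PySem.Str.slice word none (some i)
      let part2 := PySem.Str.slice word (some i) (some j)
      let part3 := PySem.Str.slice word (some j) none
      let new_word := ((PySem.Str.slice? part1 none none (-1)).getD "")
        ++ ((PySem.Str.slice? part2 none none (-1)).getD "")
        ++ ((PySem.Str.slice? part3 none none (-1)).getD "")
      if new_word < min_word then new_word else min_word) min_word) word

-- ===== PORT B =====
def split_and_reverse_alt (word : String) : String :=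
  let n : Int := PySem.Str.len word
  let candidates := (PySem.List.pyRange 1 (n - 1)).foldl (fun candidates i =>
    let r := (PySem.Str.slice? (PySem.Str.slice word (some i) none) none none (-1)).getD ""
    let m := n - i
    let best_rotation := (PySem.List.min?
      ((PySem.List.pyRange 1 m).map (fun t =>
        PySem.Str.slice r (some t) none ++ PySem.Str.slice r none (some t)))
      (fun y => y)).getD ""
    candidates ++
      [((PySem.Str.slice? (PySem.Str.slice word none (some i)) none none (-1)).getD ""
        ++ best_rotation)]) [word]
  (PySem.List.min? candidates (fun y => y)).getD ""

-- ===== PRECONDITION & SPEC =====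
def Spec_split_and_reverse (word : String) (out : String) : Prop := out = split_and_reverse_alt word
instance (word : String) (out : String) : Decidable (Spec_split_and_reverse word out) := by unfold Spec_split_and_reverse; infer_instance

-- ===== CLAIM (what is proved, stated in full; the proofs are below) =====
def Claim_equal_split_and_reverse : Prop := ∀ (word : String), Dom_split_and_reverse word → Spec_split_and_reverse word (split_and_reverse word)

-- ===== LEMMAS AND PROOFS =====

-- canonical form of the (i, j) candidate
def pvG (w : String) (i j : Int) : String :=
  String.ofList ((w.toList.take i.toNat).reverse
    ++ ((w.toList.take j.toNat).drop i.toNat).reverse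
    ++ (w.toList.drop j.toNat).reverse)

lemma pvIf_eq_min (c mw : String) : (if c < mw then c else mw) = min mw c := by
  rcases lt_or_ge c mw with h | h
  · simp [h, min_eq_right h.le]
  · simp [not_lt.mpr h, min_eq_left h]

lemma pvStrSlice_toList (s : String) (a b : Option Int) :
    (PySem.Str.slice s a b).toList = PySem.List.slice s.toList a b := by
  simp [PySem.Str.slice, PySem.Chars.slice]

lemma pvRev_getD (s : String) :
    (PySem.Str.slice? s none none (-1)).getD "" = String.ofList s.toList.reverse := by
  simp [PySem.Str.slice?_none_none_neg_one]

lemma pvCandA_eq (w : String) (i j : Int) (h1 : 1 ≤ i) (h2 : i < j) :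
    ((PySem.Str.slice? (PySem.Str.slice w none (some i)) none none (-1)).getD "")
      ++ ((PySem.Str.slice? (PySem.Str.slice w (some i) (some j)) none none (-1)).getD "")
      ++ ((PySem.Str.slice? (PySem.Str.slice w (some j) none) none none (-1)).getD "")
      = pvG w i j := by
  apply String.toList_inj.mp
  simp only [pvRev_getD, pvG, String.toList_append, String.toList_ofList, pvStrSlice_toList]
  rw [PySem.List.slice_to _ (by omega), PySem.List.slice_toNat _ (by omega) (by omega),
    PySem.List.slice_from _ (by omega), List.drop_take]

-- B's (i, t) candidate: reversed prefix followed by a rotation of the reversed suffix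
lemma pvCandB_eq (w : String) (n i t : Int) (hn : n = (w.toList.length : Int))
    (h1 : 1 ≤ i) (ht1 : 1 ≤ t) (ht2 : t < n - i) :
    ((PySem.Str.slice? (PySem.Str.slice w none (some i)) none none (-1)).getD ""
      ++ (PySem.Str.slice
            ((PySem.Str.slice? (PySem.Str.slice w (some i) none) none none (-1)).getD "")
            (some t) none
          ++ PySem.Str.slice
            ((PySem.Str.slice? (PySem.Str.slice w (some i) none) none none (-1)).getD "")
            none (some t)))
      = pvG w i (n - t) := by
  apply String.toList_inj.mp
  simp only [pvRev_getD, pvG, String.toList_append, String.toList_ofList, pvStrSlice_toList,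
    String.toList_ofList]
  rw [PySem.List.slice_to _ (by omega), PySem.List.slice_from _ (by omega),
    PySem.List.slice_from _ (by omega), PySem.List.slice_to _ (by omega),
    List.drop_reverse, List.take_reverse]
  rw [List.append_assoc]
  congr 2
  · -- rotation's first part = rev(word[i:(n-t)])
    rw [List.drop_take]
    congr 2
    simp only [List.length_drop]
    omega
  · -- rotation's second part = rev(word[(n-t):])
    rw [List.drop_drop]
    simp only [List.length_drop]
    rw [show i.toNat + (w.toList.length - i.toNat - t.toNat) = (n - t).toNat by omega]

-- a common prefix factors out of lexicographic comparison and hence out of min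
lemma pvLex_append_iff (p x y : List Char) : p ++ x < p ++ y ↔ x < y := by
  show List.Lex (· < ·) (p ++ x) (p ++ y) ↔ List.Lex (· < ·) x y
  induction p with
  | nil => simp
  | cons c p ih => simpa [List.cons_append, List.lex_cons_iff] using ih

lemma pvStr_append_lt (p x y : String) : p ++ x < p ++ y ↔ x < y := by
  rw [String.lt_iff_toList_lt, String.lt_iff_toList_lt, String.toList_append,
    String.toList_append]
  exact pvLex_append_iff p.toList x.toList y.toList

lemma pvMin_append (p x y : String) : min (p ++ x) (p ++ y) = p ++ min x y := by
  by_cases h : x < y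
  · rw [min_eq_left h.le, min_eq_left ((pvStr_append_lt p x y).mpr h).le]
  · rw [min_eq_right (not_lt.mp h),
      min_eq_right (not_lt.mp (fun hc => h ((pvStr_append_lt p x y).mp hc)))]

lemma pvFoldl_min_append (p : String) (l : List String) (x : String) :
    p ++ l.foldl min x = (l.map (fun y => p ++ y)).foldl min (p ++ x) := by
  induction l generalizing x with
  | nil => rfl
  | cons c l ih => simp only [List.foldl_cons, List.map_cons, ← pvMin_append, ih]

lemma pvFoldl_min_fold (g : Int → String) (l : List Int) :
    ∀ a b : String, l.foldl (fun mw t => min mw (g t)) (min a b)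
      = min a (l.foldl (fun mw t => min mw (g t)) b) := by
  induction l with
  | nil => intro a b; rfl
  | cons c l ih =>
    intro a b
    simp only [List.foldl_cons]
    rw [min_assoc, ih]

lemma pvJs_perm (n i : Int) :
    (PySem.List.pyRange (i + 1) n).Perm
      ((PySem.List.pyRange 1 (n - i)).map (fun t => n - t)) := by
  rw [List.perm_ext_iff_of_nodup (PySem.List.nodup_pyRange_one _ _)
    ((PySem.List.nodup_pyRange_one _ _).map (fun a b h => by omega))]
  intro x
  simp only [List.mem_map, PySem.List.mem_pyRange_one]
  constructor
  · rintro ⟨hx1, hx2⟩; exact ⟨n - x, by omega, by omega⟩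
  · rintro ⟨t, ⟨ht1, ht2⟩, rfl⟩; omega

-- ===== VERDICT (by name: the statement is the Claim_ definition above) =====
theorem split_and_reverse_spec : Claim_equal_split_and_reverse := by
  intro word _
  unfold Spec_split_and_reverse
  simp only [split_and_reverse, split_and_reverse_alt, PySem.Str.len_eq]
  set n : Int := (word.toList.length : Int) with hn
  rw [PySem.List.foldl_append_singleton_eq_map, List.singleton_append, PySem.List.min?_id_cons,
    Option.getD_some, List.foldl_map]
  apply PySem.List.foldl_congr_mem
  intro acc i hi
  rw [PySem.List.mem_pyRange_one] at hi
  -- left side (A's inner loop): a fold of binary mins over the canonical candidates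
  have hA : (PySem.List.pyRange (i + 1) n).foldl (fun mw j =>
      if ((PySem.Str.slice? (PySem.Str.slice word none (some i)) none none (-1)).getD "")
          ++ ((PySem.Str.slice? (PySem.Str.slice word (some i) (some j)) none none (-1)).getD "")
          ++ ((PySem.Str.slice? (PySem.Str.slice word (some j) none) none none (-1)).getD "")
          < mw
        then ((PySem.Str.slice? (PySem.Str.slice word none (some i)) none none (-1)).getD "")
          ++ ((PySem.Str.slice? (PySem.Str.slice word (some i) (some j)) none none (-1)).getD "")
          ++ ((PySem.Str.slice? (PySem.Str.slice word (some j) none) none none (-1)).getD "")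
        else mw) acc
      = (PySem.List.pyRange 1 (n - i)).foldl
          (fun mw t => min mw (pvG word i (n - t))) acc := by
    have rc : RightCommutative (fun (mw : String) (j : Int) => min mw (pvG word i j)) :=
      ⟨fun b a1 a2 => min_right_comm b (pvG word i a1) (pvG word i a2)⟩
    have h1 : (PySem.List.pyRange (i + 1) n).foldl (fun mw j =>
        if ((PySem.Str.slice? (PySem.Str.slice word none (some i)) none none (-1)).getD "")
            ++ ((PySem.Str.slice? (PySem.Str.slice word (some i) (some j)) none none (-1)).getD "")
            ++ ((PySem.Str.slice? (PySem.Str.slice word (some j) none) none none (-1)).getD "")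
            < mw
          then ((PySem.Str.slice? (PySem.Str.slice word none (some i)) none none (-1)).getD "")
            ++ ((PySem.Str.slice? (PySem.Str.slice word (some i) (some j)) none none (-1)).getD "")
            ++ ((PySem.Str.slice? (PySem.Str.slice word (some j) none) none none (-1)).getD "")
          else mw) acc
        = (PySem.List.pyRange (i + 1) n).foldl
            (fun mw j => min mw (pvG word i j)) acc := by
      apply PySem.List.foldl_congr_mem
      intro mw j hj
      rw [PySem.List.mem_pyRange_one] at hj
      rw [pvIf_eq_min, pvCandA_eq word i j (by omega) (by omega)]
    rw [h1, @List.Perm.foldl_eq _ _ (fun (mw : String) (j : Int) => min mw (pvG word i j))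
      _ _ rc (pvJs_perm n i) acc, List.foldl_map]
  rw [hA]
  -- right side (B's per-i candidate): the same fold, with acc pulled out in front
  have hm : (1 : Int) < n - i := by omega
  rw [PySem.List.pyRange_one_cons hm, List.map_cons, PySem.List.min?_id_cons, Option.getD_some,
    pvFoldl_min_append, List.map_map]
  have h2 : ((PySem.List.pyRange (1 + 1) (n - i)).map (fun t =>
      ((PySem.Str.slice? (PySem.Str.slice word none (some i)) none none (-1)).getD "") ++
        (PySem.Str.slice
          ((PySem.Str.slice? (PySem.Str.slice word (some i) none) none none (-1)).getD "")
          (some t) none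
        ++ PySem.Str.slice
          ((PySem.Str.slice? (PySem.Str.slice word (some i) none) none none (-1)).getD "")
          none (some t)))).foldl min
        (((PySem.Str.slice? (PySem.Str.slice word none (some i)) none none (-1)).getD "") ++
          (PySem.Str.slice
            ((PySem.Str.slice? (PySem.Str.slice word (some i) none) none none (-1)).getD "")
            (some 1) none
          ++ PySem.Str.slice
            ((PySem.Str.slice? (PySem.Str.slice word (some i) none) none none (-1)).getD "")
            none (some 1)))
      = ((PySem.List.pyRange (1 + 1) (n - i)).map (fun t => pvG word i (n - t))).foldl min
          (pvG word i (n - 1)) := by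
    rw [pvCandB_eq word n i 1 hn (by omega) (by omega) (by omega), List.foldl_map,
      List.foldl_map]
    apply PySem.List.foldl_congr_mem
    intro mw t ht
    rw [PySem.List.mem_pyRange_one] at ht
    rw [pvCandB_eq word n i t hn (by omega) (by omega) (by omega)]
  rw [Function.comp_def, h2, List.foldl_cons, List.foldl_map]
  exact pvFoldl_min_fold (fun t => pvG word i (n - t))
    (PySem.List.pyRange (1 + 1) (n - i)) acc (pvG word i (n - 1))
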